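-- pv_equiv track=rewrite | github.com/srishtayal/nalum | ez-parse/Resume-Parser/parser.py | get_certifications
-- ===== SOURCE A (Python) =====
-- TAGS = {
--     "Contact",
--     "Top Skills",
--     "Certifications",
--     "Honors-Awards",
--     "Publications",
--     "Summary",
--     "Languages",
--     "Experience",
--     "Education",
-- }
--
-- def get_certifications(result_list, i):
--     certifications = []
--     for j in range(i + 1, len(result_list)):
--         if not result_list[j][0]:
--             continue
--         elif "Page" in result_list[j][0]:
--             continue
--         elif result_list[j][0] not in TAGS:
--             certifications.append(result_list[j][0].strip())
--         else:
--             return certifications, j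
--     return certifications, len(result_list)
-- ===== SOURCE B (Python) =====
-- TAGS = {
--     "Contact",
--     "Top Skills",
--     "Certifications",
--     "Honors-Awards",
--     "Publications",
--     "Summary",
--     "Languages",
--     "Experience",
--     "Education",
-- }
--
-- def get_certifications(result_list, i):
--     n = len(result_list)
--     stop = n
--     for j in range(i + 1, n):
--         head = result_list[j][0]
--         if head and "Page" not in head and head in TAGS:
--             stop = j
--             break
--     certifications = [result_list[j][0].strip() for j in range(i + 1, stop)
--                       if result_list[j][0] and "Page" not in result_list[j][0]]
--     return certifications, stop
-- ===== Notes on version B (the rewrite author's own statement) =====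
-- stated objective: alternative
-- what changed: B replaces A's single interleaved loop-with-early-return by two separately shaped passes: a first scan that only computes the stopping index (defaulting to len(result_list)), then a list comprehension over range(i+1, stop) that keeps the truthy non-'Page' headers stripped.
import Mathlib
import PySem

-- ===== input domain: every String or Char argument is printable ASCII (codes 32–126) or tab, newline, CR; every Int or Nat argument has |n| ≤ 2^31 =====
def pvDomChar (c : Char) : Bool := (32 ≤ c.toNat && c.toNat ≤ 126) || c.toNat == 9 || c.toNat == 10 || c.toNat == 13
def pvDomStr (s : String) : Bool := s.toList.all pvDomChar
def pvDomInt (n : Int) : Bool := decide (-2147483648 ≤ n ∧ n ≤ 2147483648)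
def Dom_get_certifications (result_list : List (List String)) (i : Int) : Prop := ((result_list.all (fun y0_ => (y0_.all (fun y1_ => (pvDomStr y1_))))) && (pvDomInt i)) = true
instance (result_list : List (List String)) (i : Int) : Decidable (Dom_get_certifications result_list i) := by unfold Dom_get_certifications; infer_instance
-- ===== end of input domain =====

-- B splits A's interleaved loop-with-early-return into two passes (find the stop index, then
-- collect the kept lines by a comprehension); same cost, different decomposition.

-- shared helper: result_list[j][0] (both Pythons write exactly this; pyGetD is safe under Pre_)
def pvHead (rl : List (List String)) (j : Int) : String :=
  PySem.List.pyGetD (PySem.List.pyGetD rl j []) 0 ""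

-- the module constant TAGS (a Python set used only for membership tests)
def pvTags : List String :=
  ["Contact", "Top Skills", "Certifications", "Honors-Awards", "Publications",
   "Summary", "Languages", "Experience", "Education"]

-- a row header on which both loops stop and return
def pvIsStop (h : String) : Bool :=
  !(h == "") && !(PySem.Str.isIn "Page" h) && pvTags.contains h

-- ===== PORT A =====
-- the for-loop with early return, as fuel recursion over j = i+1 .. n-1
def pvLoopA (rl : List (List String)) (n : Int) :
    Nat → Int → List String → List String × Int
  | 0, _, acc => (acc, n)
  | fuel + 1, j, acc =>
      let h := pvHead rl j
      if h = "" then pvLoopA rl n fuel (j + 1) acc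
      else if PySem.Str.isIn "Page" h then pvLoopA rl n fuel (j + 1) acc
      else if ¬ pvTags.contains h then pvLoopA rl n fuel (j + 1) (acc ++ [PySem.Str.strip h])
      else (acc, j)

def get_certifications (result_list : List (List String)) (i : Int) : List String × Int :=
  let n : Int := result_list.length
  pvLoopA result_list n (n - (i + 1)).toNat (i + 1) []

-- ===== PORT B =====
-- first pass: the stopping index (defaults to n)
def pvStopB (rl : List (List String)) (n : Int) : Nat → Int → Int
  | 0, _ => n
  | fuel + 1, j =>
      let h := pvHead rl j
      if h ≠ "" ∧ PySem.Str.isIn "Page" h = false ∧ pvTags.contains h then j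
      else pvStopB rl n fuel (j + 1)

-- the comprehension's body: keep a truthy, non-'Page' header, stripped
def pvKeep (rl : List (List String)) (j : Int) : Option String :=
  let h := pvHead rl j
  if h ≠ "" ∧ PySem.Str.isIn "Page" h = false then some (PySem.Str.strip h) else none

def get_certifications_alt (result_list : List (List String)) (i : Int) : List String × Int :=
  let n : Int := result_list.length
  let stop := pvStopB result_list n (n - (i + 1)).toNat (i + 1)
  ((PySem.List.pyRange (i + 1) stop 1).filterMap (pvKeep result_list), stop)

-- ===== PRECONDITION & SPEC =====
-- Pre_ excludes exactly the inputs on which the Python A raises IndexError: a scanned index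
-- below -len(result_list), or an empty row result_list[j] at a scanned index j that the loop
-- actually reaches (i.e. no stopping tag occurs strictly between i+1 and j); everywhere else
-- both Pythons return normally.
def Pre_get_certifications (result_list : List (List String)) (i : Int) : Prop :=
  (i + 1 < (result_list.length : Int) → -(result_list.length : Int) ≤ i + 1) ∧
  ∀ j ∈ PySem.List.pyRange (i + 1) (result_list.length : Int) 1,
    (∀ k ∈ PySem.List.pyRange (i + 1) j 1, pvIsStop (pvHead result_list k) = false) →
    PySem.List.pyGetD result_list j [] ≠ []
instance (result_list : List (List String)) (i : Int) :
    Decidable (Pre_get_certifications result_list i) := by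
  unfold Pre_get_certifications; infer_instance

def pvWitness_get_certifications : List (List String) × Int := ([["Summary"], [" AWS Cert "]], 0)

def Spec_get_certifications (result_list : List (List String)) (i : Int) (out : List String × Int) : Prop := out = get_certifications_alt result_list i
instance (result_list : List (List String)) (i : Int) (out : List String × Int) : Decidable (Spec_get_certifications result_list i out) := by unfold Spec_get_certifications; infer_instance

-- ===== CLAIM (what is proved, stated in full; the proofs are below) =====
def Claim_equal_get_certifications : Prop := ∀ (result_list : List (List String)) (i : Int), Dom_get_certifications result_list i → Pre_get_certifications result_list i → Spec_get_certifications result_list i (get_certifications result_list i)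

-- ===== LEMMAS AND PROOFS =====

-- the stop index never falls below min j n when fuel is exactly the remaining trip count
lemma pvStopB_lb (rl : List (List String)) (n : Int) :
    ∀ (fuel : Nat) (j : Int), fuel = (n - j).toNat →
      min j n ≤ pvStopB rl n fuel j := by
  intro fuel
  induction fuel with
  | zero => intro j _; simp [pvStopB]
  | succ fuel ih =>
      intro j hf
      have hjn : j < n := by omega
      simp only [pvStopB]
      split
      · omega
      · have := ih (j + 1) (by omega)
        omega

-- A's loop equals (acc ++ the comprehension up to B's stop, B's stop)
lemma pvLoopA_eq (rl : List (List String)) (n : Int) :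
    ∀ (fuel : Nat) (j : Int) (acc : List String), fuel = (n - j).toNat →
      pvLoopA rl n fuel j acc =
        (acc ++ (PySem.List.pyRange j (pvStopB rl n fuel j) 1).filterMap (pvKeep rl),
         pvStopB rl n fuel j) := by
  intro fuel
  induction fuel with
  | zero =>
      intro j acc hf
      have hle : n ≤ j := by omega
      simp [pvLoopA, pvStopB, PySem.List.pyRange_one_eq_nil hle]
  | succ fuel ih =>
      intro j acc hf
      have hjn : j < n := by omega
      have hlt : j < pvStopB rl n fuel (j + 1) := by
        have := pvStopB_lb rl n fuel (j + 1) (by omega)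
        omega
      simp only [pvLoopA, pvStopB]
      by_cases h0 : pvHead rl j = ""
      · have hk : pvKeep rl j = none := by
          unfold pvKeep; rw [if_neg (fun hc => hc.1 h0)]
        rw [if_pos h0, if_neg (fun hc => hc.1 h0),
            PySem.List.pyRange_one_cons hlt, List.filterMap_cons, hk,
            ih (j + 1) acc (by omega)]
      · rw [if_neg h0]
        cases hB : PySem.Str.isIn "Page" (pvHead rl j) with
        | true =>
            have hk : pvKeep rl j = none := by
              unfold pvKeep
              rw [if_neg (by intro hc; rw [hB] at hc; simp at hc)]
            rw [if_pos rfl, if_neg (fun hc => Bool.noConfusion hc.2.1),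
                PySem.List.pyRange_one_cons hlt, List.filterMap_cons, hk,
                ih (j + 1) acc (by omega)]
        | false =>
            rw [if_neg Bool.false_ne_true]
            cases hT : pvTags.contains (pvHead rl j) with
            | true =>
                rw [if_neg (fun hc => hc rfl),
                    if_pos ⟨h0, rfl, rfl⟩, PySem.List.pyRange_one_eq_nil (le_refl j)]
                simp
            | false =>
                have hk : pvKeep rl j = some (PySem.Str.strip (pvHead rl j)) := by
                  unfold pvKeep; rw [if_pos ⟨h0, hB⟩]
                rw [if_pos Bool.false_ne_true,
                    if_neg (fun hc => Bool.noConfusion hc.2.2),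
                    PySem.List.pyRange_one_cons hlt, List.filterMap_cons, hk,
                    ih (j + 1) (acc ++ [PySem.Str.strip (pvHead rl j)]) (by omega)]
                simp

-- ===== VERDICT (by name: the statement is the Claim_ definition above) =====
theorem get_certifications_spec : Claim_equal_get_certifications := by
  intro rl i _ _
  unfold Spec_get_certifications get_certifications get_certifications_alt
  exact pvLoopA_eq rl rl.length _ (i + 1) [] rfl
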